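-- pv_equiv track=rewrite | github.com/authenciat/hybrid-codes | output_analysis.py | are_independent
-- ===== SOURCE A (Python) =====
-- def get_support_pattern(op):
--     """Get the positions and types of non-identity operators"""
--     return [(i, p) for i, p in enumerate(op) if p != 'I']
--
-- def are_independent(op1, op2, logical_ops):
--     """
--     Check if operators are truly independent (not products of each other or logical ops)
--     Returns True if operators are independent, False otherwise
--     """
--     # If they're identical or one is in logical_ops, they're not independent
--     if op1 == op2 or op1 in logical_ops or op2 in logical_ops:
--         return False
--
--     # Get support patterns
--     op1_support = get_support_pattern(op1)
--     op2_support = get_support_pattern(op2)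
--
--     # Check if they have completely overlapping support
--     op1_positions = {pos for pos, _ in op1_support}
--     op2_positions = {pos for pos, _ in op2_support}
--     if op1_positions == op2_positions:
--         return False
--
--     # Check if one support is contained within the other
--     if op1_positions.issubset(op2_positions) or op2_positions.issubset(op1_positions):
--         return False
--
--     return True
-- ===== SOURCE B (Python) =====
-- def are_independent(op1, op2, logical_ops):
--     """
--     Check if operators are truly independent (not products of each other or logical ops)
--     Returns True if operators are independent, False otherwise
--     """
--     if op1 == op2 or op1 in logical_ops or op2 in logical_ops:
--         return False
--     # One element-wise pass: each operator must have support where the other has none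
--     op1_exclusive = False
--     op2_exclusive = False
--     n = max(len(op1), len(op2))
--     for i in range(n):
--         p = op1[i] if i < len(op1) else 'I'
--         q = op2[i] if i < len(op2) else 'I'
--         if p != 'I' and q == 'I':
--             op1_exclusive = True
--         if q != 'I' and p == 'I':
--             op2_exclusive = True
--     return op1_exclusive and op2_exclusive
-- ===== Notes on version B (the rewrite author's own statement) =====
-- stated objective: simpler
-- what changed: Dropped the support-pattern lists, the two position sets and their equality/subset comparisons; B makes a single element-wise pass over the two operators padded with 'I' to equal length, maintaining two booleans (each operator has support where the other has none) and returns their conjunction.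
import Mathlib
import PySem

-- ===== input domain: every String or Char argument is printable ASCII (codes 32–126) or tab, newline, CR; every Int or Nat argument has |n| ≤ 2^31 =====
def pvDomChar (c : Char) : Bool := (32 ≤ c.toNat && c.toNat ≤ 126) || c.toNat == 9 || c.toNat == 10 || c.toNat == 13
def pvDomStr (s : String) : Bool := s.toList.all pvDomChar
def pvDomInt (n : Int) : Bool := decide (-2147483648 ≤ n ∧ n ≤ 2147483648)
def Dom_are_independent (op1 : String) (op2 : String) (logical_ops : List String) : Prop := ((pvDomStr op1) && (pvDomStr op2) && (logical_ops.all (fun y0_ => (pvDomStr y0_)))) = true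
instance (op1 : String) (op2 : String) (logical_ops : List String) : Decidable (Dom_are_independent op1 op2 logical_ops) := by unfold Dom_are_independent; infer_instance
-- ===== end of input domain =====

-- B replaces A's two position sets and their equality/subset comparisons by a single
-- element-wise scan ('I'-padded to the longer operator) maintaining two exclusivity flags (objective: simpler).

-- ===== PORT A =====
def get_support_pattern (op : List Char) : List (Int × Char) :=
  (PySem.List.enumerate op).filter (fun p => p.2 != 'I')

def are_independent (op1 : String) (op2 : String) (logical_ops : List String) : Bool :=
  if op1 == op2 || logical_ops.contains op1 || logical_ops.contains op2 then false
  else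
    let op1_support := get_support_pattern op1.toList
    let op2_support := get_support_pattern op2.toList
    let op1_positions : PySem.Set Int := PySem.Set.ofList (op1_support.map (fun p => p.1))
    let op2_positions : PySem.Set Int := PySem.Set.ofList (op2_support.map (fun p => p.1))
    if PySem.Set.equal op1_positions op2_positions then false
    else if PySem.Set.issubset op1_positions op2_positions
         || PySem.Set.issubset op2_positions op1_positions then false
    else true

-- ===== PORT B =====
def are_independent_alt (op1 : String) (op2 : String) (logical_ops : List String) : Bool :=
  if op1 == op2 || logical_ops.contains op1 || logical_ops.contains op2 then false
  else
    let l1 := op1.toList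
    let l2 := op2.toList
    let n : Int := max (PySem.List.len l1) (PySem.List.len l2)
    let st := (PySem.List.pyRange 0 n 1).foldl (fun (st : Bool × Bool) i =>
      let p := if i < PySem.List.len l1 then PySem.List.pyGetD l1 i 'I' else 'I'
      let q := if i < PySem.List.len l2 then PySem.List.pyGetD l2 i 'I' else 'I'
      ((if p != 'I' && q == 'I' then true else st.1),
       (if q != 'I' && p == 'I' then true else st.2))) (false, false)
    st.1 && st.2

-- ===== PRECONDITION & SPEC =====
def Spec_are_independent (op1 : String) (op2 : String) (logical_ops : List String) (out : Bool) : Prop := out = are_independent_alt op1 op2 logical_ops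
instance (op1 : String) (op2 : String) (logical_ops : List String) (out : Bool) : Decidable (Spec_are_independent op1 op2 logical_ops out) := by unfold Spec_are_independent; infer_instance

-- ===== CLAIM (what is proved, stated in full; the proofs are below) =====
def Claim_equal_are_independent : Prop := ∀ (op1 : String) (op2 : String) (logical_ops : List String), Dom_are_independent op1 op2 logical_ops → Spec_are_independent op1 op2 logical_ops (are_independent op1 op2 logical_ops)

-- ===== LEMMAS AND PROOFS =====

-- the position set A builds for an operator string
def posSet (l : List Char) : PySem.Set Int :=
  PySem.Set.ofList ((get_support_pattern l).map (fun p => p.1))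

-- "l1 has support at a position where l2 ('I'-padded) has none"
def Excl (l1 l2 : List Char) : Prop :=
  ∃ k : Nat, l1.getD k 'I' ≠ 'I' ∧ l2.getD k 'I' = 'I'

lemma mem_posSet (l : List Char) (x : Int) :
    x ∈ posSet l ↔ ∃ k : Nat, x = (k : Int) ∧ l.getD k 'I' ≠ 'I' := by
  simp only [posSet, get_support_pattern, PySem.Set.mem_ofList, List.mem_map, List.mem_filter,
        PySem.List.mem_enumerate_iff]
  constructor
  · rintro ⟨⟨a, c⟩, ⟨⟨k, hk, heq⟩, hne⟩, rfl⟩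
    cases heq
    exact ⟨k, by omega, by simpa [List.getD, hk] using hne⟩
  · rintro ⟨k, rfl, hne⟩
    have hk : k < l.length := by
      by_contra h
      exact hne (List.getD_eq_default _ _ (by omega))
    exact ⟨((k:Int), l[k]), ⟨⟨k, hk, by simp⟩, by simpa [List.getD, hk] using hne⟩, rfl⟩

lemma issubset_posSet_iff (l1 l2 : List Char) :
    PySem.Set.issubset (posSet l1) (posSet l2) = true ↔ ¬ Excl l1 l2 := by
  rw [PySem.Set.issubset_iff]
  constructor
  · rintro hsub ⟨k, h1, h2⟩
    obtain ⟨j, hj, hne⟩ := (mem_posSet l2 _).1 (hsub _ ((mem_posSet l1 _).2 ⟨k, rfl, h1⟩))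
    exact hne (by rwa [show j = k by exact_mod_cast hj.symm])
  · intro hne x hx
    obtain ⟨k, rfl, h1⟩ := (mem_posSet l1 _).1 hx
    exact (mem_posSet l2 _).2 ⟨k, rfl, fun h2 => hne ⟨k, h1, h2⟩⟩

lemma entry_eq (l : List Char) (i : Int) (h : 0 ≤ i) :
    (if i < PySem.List.len l then PySem.List.pyGetD l i 'I' else 'I') = l.getD i.toNat 'I' := by
  rw [PySem.List.len_eq]
  split_ifs with hlt
  · rw [PySem.List.pyGetD_eq_getElem l 'I' h hlt]
    exact (List.getD_eq_getElem l 'I' (by omega)).symm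
  · exact (List.getD_eq_default _ _ (by omega)).symm

lemma any_flag_iff (l1 l2 : List Char) (n : Int) (hn : PySem.List.len l1 ≤ n) :
    ((PySem.List.pyRange 0 n 1).any
      (fun i => (if i < PySem.List.len l1 then PySem.List.pyGetD l1 i 'I' else 'I') != 'I' &&
                (if i < PySem.List.len l2 then PySem.List.pyGetD l2 i 'I' else 'I') == 'I')) = true
    ↔ Excl l1 l2 := by
  rw [List.any_eq_true]
  constructor
  · rintro ⟨i, hmem, hcond⟩
    have h0 : 0 ≤ i := (PySem.List.mem_pyRange_one.1 hmem).1
    rw [entry_eq l1 i h0, entry_eq l2 i h0] at hcond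
    simp only [Bool.and_eq_true, bne_iff_ne, beq_iff_eq] at hcond
    exact ⟨i.toNat, hcond.1, hcond.2⟩
  · rintro ⟨k, h1, h2⟩
    have hk : k < l1.length := by
      by_contra h
      exact h1 (List.getD_eq_default _ _ (by omega))
    have hlen := PySem.List.len_eq l1
    refine ⟨(k : Int), PySem.List.mem_pyRange_one.2 ⟨by omega, by omega⟩, ?_⟩
    rw [entry_eq l1 _ (by omega), entry_eq l2 _ (by omega)]
    simp only [Int.toNat_natCast, Bool.and_eq_true, bne_iff_ne, beq_iff_eq]
    exact ⟨h1, h2⟩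

lemma are_independent_eq_alt (op1 op2 : String) (lo : List String) :
    are_independent op1 op2 lo = are_independent_alt op1 op2 lo := by
  unfold are_independent are_independent_alt
  by_cases hg : (op1 == op2 || lo.contains op1 || lo.contains op2) = true
  · simp only [hg, if_true]
  · rw [Bool.not_eq_true] at hg
    simp only [hg, Bool.false_eq_true, if_false]
    rw [PySem.List.foldl_prod_mk
      (f := fun a i => if ((if i < PySem.List.len op1.toList then PySem.List.pyGetD op1.toList i 'I' else 'I') != 'I' &&
                           (if i < PySem.List.len op2.toList then PySem.List.pyGetD op2.toList i 'I' else 'I') == 'I') then true else a)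
      (g := fun a i => if ((if i < PySem.List.len op2.toList then PySem.List.pyGetD op2.toList i 'I' else 'I') != 'I' &&
                           (if i < PySem.List.len op1.toList then PySem.List.pyGetD op1.toList i 'I' else 'I') == 'I') then true else a)]
    rw [PySem.List.foldl_if_true_eq, PySem.List.foldl_if_true_eq]
    simp only [Bool.false_or]
    have e12 := issubset_posSet_iff op1.toList op2.toList
    have e21 := issubset_posSet_iff op2.toList op1.toList
    have f1 := any_flag_iff op1.toList op2.toList (max (PySem.List.len op1.toList) (PySem.List.len op2.toList)) (le_max_left _ _)
    have f2 := any_flag_iff op2.toList op1.toList (max (PySem.List.len op1.toList) (PySem.List.len op2.toList)) (le_max_right _ _)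
    unfold posSet at e12 e21
    by_cases h12 : Excl op1.toList op2.toList
    · by_cases h21 : Excl op2.toList op1.toList
      · have s12 : _ = false := Bool.eq_false_iff.2 (fun h => (e12.1 h) h12)
        have s21 : _ = false := Bool.eq_false_iff.2 (fun h => (e21.1 h) h21)
        have heq : PySem.Set.equal (PySem.Set.ofList ((get_support_pattern op1.toList).map (fun p => p.1)))
            (PySem.Set.ofList ((get_support_pattern op2.toList).map (fun p => p.1))) = false := by
          refine Bool.eq_false_iff.2 (fun h => (e12.1 ?_) h12)
          exact (PySem.Set.issubset_iff _ _).2 (fun x hx => ((PySem.Set.equal_iff _ _).1 h x).1 hx)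
        rw [f1.2 h12, f2.2 h21, s12, s21, heq]
        simp
      · have a2 : _ = false := Bool.eq_false_iff.2 (fun h => h21 (f2.1 h))
        rw [e21.2 h21, a2]
        simp
    · have a1 : _ = false := Bool.eq_false_iff.2 (fun h => h12 (f1.1 h))
      rw [e12.2 h12, a1]
      simp

-- ===== VERDICT (by name: the statement is the Claim_ definition above) =====
theorem are_independent_spec : Claim_equal_are_independent := by
  intro op1 op2 lo _
  unfold Spec_are_independent
  exact are_independent_eq_alt op1 op2 lo
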